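-- pv_equiv track=rewrite | github.com/SETI/rms-data-projects | metadata/__init__.py | sclk_split_count
-- ===== SOURCE A (Python) =====
-- def sclk_split_count(count, delim=None):
--
--     # Replace all non-alphanumerics with default delimiter if non given
--     if delim is None:
--         delim = '.'
--         delims = list(set([c for c in count if not c.isalnum()]))
--         table = {ord(d): ord(delim) for d in delims}
--         count = count.translate(table)
--
--     # Split the count string
--     fields = list(map(int, (count.split(delim))))
--     fields = fields + [0,0,0,0]
--
--     return fields[0:4]
-- ===== SOURCE B (Python) =====
-- def sclk_split_count(count, delim=None):
--
--     # One pass: accumulate alphanumeric runs, flush a token at every other char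
--     if delim is None:
--         tokens = []
--         cur = ''
--         for c in count:
--             if c.isalnum():
--                 cur += c
--             else:
--                 tokens.append(cur)
--                 cur = ''
--         tokens.append(cur)
--     else:
--         tokens = count.split(delim)
--
--     fields = [int(t) for t in tokens]
--     return fields[:4] + [0] * (4 - len(fields))
-- ===== Notes on version B (the rewrite author's own statement) =====
-- stated objective: alternative
-- what changed: In the delim-None branch B replaces A's set-of-delimiters + translate-table + str.split pipeline with a single direct scan over count that accumulates alphanumeric runs and flushes a token at every other character; padding/truncation is done by slice-then-pad instead of append-four-zeros-then-slice.
import Mathlib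
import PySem

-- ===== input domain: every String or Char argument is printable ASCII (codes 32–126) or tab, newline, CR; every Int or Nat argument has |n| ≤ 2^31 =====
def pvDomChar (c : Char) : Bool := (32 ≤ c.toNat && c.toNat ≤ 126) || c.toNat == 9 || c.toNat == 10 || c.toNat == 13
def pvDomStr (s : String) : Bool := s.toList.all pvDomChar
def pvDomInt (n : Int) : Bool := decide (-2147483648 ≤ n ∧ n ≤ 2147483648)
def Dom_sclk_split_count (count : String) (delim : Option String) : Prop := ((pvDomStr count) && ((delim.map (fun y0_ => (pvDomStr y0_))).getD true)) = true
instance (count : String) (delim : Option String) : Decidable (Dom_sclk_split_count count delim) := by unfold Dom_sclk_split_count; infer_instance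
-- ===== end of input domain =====

-- B replaces A's set + translate-table + str.split pipeline in the delim-None branch by a single
-- direct scan that flushes alphanumeric runs; same values, no speed claim (objective: alternative).

-- ===== PORT A =====
def sclk_split_count (count : String) (delim : Option String) : List Int :=
  -- 'if delim is None: delim = '.'; delims = list(set(...)); table = {...}; count = count.translate(table)'
  let st : List Char × List Char :=
    match delim with
    | none =>
      let delims : PySem.Set Char :=
        PySem.Set.ofList (count.toList.filter (fun c => !PySem.Chars.isalnum c))
      let table : PySem.Dict Int Int :=
        delims.foldl (fun d c => d.insert ((c.toNat : Int)) (('.'.toNat : Int))) PySem.Dict.empty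
      -- str.translate ported by hand, exact here: the table maps code points to the code point of '.'
      (count.toList.map (fun c =>
        match table.get? ((c.toNat : Int)) with
        | some v => Char.ofNat v.toNat
        | none => c), ['.'])
    | some d => (count.toList, d.toList)
  let fields : List Int :=
    ((PySem.Chars.split? st.1 st.2).getD []).map (fun t => (PySem.Int.ofChars? t).getD 0)
  let fields := fields ++ [0, 0, 0, 0]
  PySem.List.slice fields (some 0) (some 4)

-- ===== PORT B =====
-- B's loop state: (finished tokens, current alphanumeric run)
def pvFlushTok (st : List (List Char) × List Char) (c : Char) : List (List Char) × List Char :=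
  if PySem.Chars.isalnum c then (st.1, st.2 ++ [c]) else (st.1 ++ [st.2], [])

def sclk_split_count_alt (count : String) (delim : Option String) : List Int :=
  let tokens : List (List Char) :=
    match delim with
    | none =>
      let st := count.toList.foldl pvFlushTok ([], [])
      st.1 ++ [st.2]
    | some d => (PySem.Chars.split? count.toList d.toList).getD []
  let fields : List Int := tokens.map (fun t => (PySem.Int.ofChars? t).getD 0)
  PySem.List.slice fields none (some 4) ++ List.replicate (4 - fields.length) 0

-- ===== PRECONDITION & SPEC =====
-- Pre_ excludes exactly the inputs where Python A raises: an empty explicit delimiter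
-- (ValueError from str.split) and any field that int() rejects (ValueError), for delim=None the
-- fields being the maximal alphanumeric runs of count.
def Pre_sclk_split_count (count : String) (delim : Option String) : Prop :=
  match delim with
  | none => ∀ t ∈ count.toList.splitOnP (fun c => !PySem.Chars.isalnum c),
      (PySem.Int.ofChars? t).isSome
  | some d => d ≠ "" ∧ ∀ t ∈ PySem.Chars.splitOn count.toList d.toList,
      (PySem.Int.ofChars? t).isSome
instance (count : String) (delim : Option String) : Decidable (Pre_sclk_split_count count delim) := by
  unfold Pre_sclk_split_count; cases delim <;> infer_instance

def pvWitness_sclk_split_count : String × Option String := ("32/123:456.7", none)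

def Spec_sclk_split_count (count : String) (delim : Option String) (out : List Int) : Prop := out = sclk_split_count_alt count delim
instance (count : String) (delim : Option String) (out : List Int) : Decidable (Spec_sclk_split_count count delim out) := by unfold Spec_sclk_split_count; infer_instance

-- ===== CLAIM (what is proved, stated in full; the proofs are below) =====
def Claim_equal_sclk_split_count : Prop := ∀ (count : String) (delim : Option String), Dom_sclk_split_count count delim → Pre_sclk_split_count count delim → Spec_sclk_split_count count delim (sclk_split_count count delim)

-- ===== LEMMAS AND PROOFS =====

-- the translation character map: non-alphanumerics become '.'
def pvG (c : Char) : Char := if PySem.Chars.isalnum c then c else '.'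

-- A's table lookup over a fold of constant-valued inserts
theorem pv_get_fold_const (l : List Char) (d : PySem.Dict Int Int) (k : Int) :
    (l.foldl (fun d c => d.insert ((c.toNat : Int)) (('.'.toNat : Int))) d).get? k
      = if ∃ c ∈ l, (c.toNat : Int) = k then some (('.'.toNat : Int)) else d.get? k := by
  induction l generalizing d with
  | nil => simp
  | cons a t ih =>
    rw [List.foldl_cons, ih]
    by_cases ht : ∃ c ∈ t, (c.toNat : Int) = k
    · rw [if_pos ht, if_pos (by obtain ⟨c, hc, hck⟩ := ht; exact ⟨c, List.mem_cons_of_mem _ hc, hck⟩)]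
    · rw [if_neg ht]
      by_cases hk : (a.toNat : Int) = k
      · rw [if_pos ⟨a, List.mem_cons_self, hk⟩, hk, PySem.Dict.get?_insert_self]
      · have hall : ¬ ∃ c ∈ a :: t, (c.toNat : Int) = k := by
          rintro ⟨c, hc, hck⟩
          rcases List.mem_cons.mp hc with rfl | hc'
          · exact hk hck
          · exact ht ⟨c, hc', hck⟩
        rw [if_neg hall]
        exact PySem.Dict.get?_insert_of_ne d _ (Ne.symm hk)

-- A's translate equals the simple character map pvG on count
theorem pv_translate_eq (count : List Char) :
    count.map (fun c =>
      match (((PySem.Set.ofList (count.filter (fun c => !PySem.Chars.isalnum c))).foldl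
          (fun d c => d.insert ((c.toNat : Int)) (('.'.toNat : Int))) PySem.Dict.empty) :
          PySem.Dict Int Int).get? ((c.toNat : Int)) with
      | some v => Char.ofNat v.toNat
      | none => c)
    = count.map pvG := by
  apply List.map_congr_left
  intro c hc
  rw [pv_get_fold_const]
  by_cases ha : PySem.Chars.isalnum c
  · have hnone : ¬ ∃ c' ∈ PySem.Set.ofList (count.filter (fun c => !PySem.Chars.isalnum c)),
        (c'.toNat : Int) = (c.toNat : Int) := by
      rintro ⟨c', hc', h⟩
      have hc'' := (PySem.Set.mem_ofList _ _).mp hc'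
      have h2 : c'.toNat = c.toNat := by exact_mod_cast h
      have heq : c' = c := by rw [← Char.ofNat_toNat c', h2, Char.ofNat_toNat]
      subst heq
      simp [List.mem_filter, ha] at hc''
    rw [if_neg hnone]
    simp [pvG, ha]
  · have hsome : ∃ c' ∈ PySem.Set.ofList (count.filter (fun c => !PySem.Chars.isalnum c)),
        (c'.toNat : Int) = (c.toNat : Int) :=
      ⟨c, (PySem.Set.mem_ofList _ _).mpr (List.mem_filter.mpr ⟨hc, by simp [ha]⟩), rfl⟩
    rw [if_pos hsome]
    have : pvG c = '.' := by simp [pvG, ha]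
    rw [this]
    rfl

-- Chars.splitOn with the single separator '.' is splitOnP (· == '.')
theorem pv_go_single (c : Char) (fuel : Nat) (l cur : List Char) (acc : List (List Char))
    (h : l.length < fuel) :
    PySem.Chars.splitOn.go [c] fuel l cur acc
      = acc.reverse ++ (l.splitOnP (· == c)).modifyHead (cur.reverse ++ ·) := by
  induction fuel generalizing l cur acc with
  | zero => omega
  | succ fuel ih =>
    cases l with
    | nil => simp [PySem.Chars.splitOn.go]
    | cons a rest =>
      by_cases hac : a = c
      · subst hac
        have hpre : List.isPrefixOf [a] (a :: rest) = true := by simp [List.isPrefixOf]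
        rw [PySem.Chars.splitOn.go, if_pos hpre]
        rw [ih _ _ _ (by simpa using h)]
        simp [List.splitOnP_cons]
        exact congrFun List.modifyHead_id _
      · have hpre : List.isPrefixOf [c] (a :: rest) = false := by
          simp [List.isPrefixOf]; exact fun h => absurd h.symm hac
        rw [PySem.Chars.splitOn.go, if_neg (by simp [hpre])]
        rw [ih _ _ _ (by simpa using h)]
        have hne := List.splitOnP_ne_nil (fun x => x == c) rest
        cases hsp : rest.splitOnP (· == c) with
        | nil => exact absurd hsp hne
        | cons h0 t0 =>
          simp [List.splitOnP_cons, hac, hsp]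

theorem pv_splitOn_single (s : List Char) (c : Char) :
    PySem.Chars.splitOn s [c] = s.splitOnP (· == c) := by
  unfold PySem.Chars.splitOn
  rw [pv_go_single c (s.length + 1) s [] [] (by omega)]
  cases h : s.splitOnP (· == c) with
  | nil => exact absurd h (List.splitOnP_ne_nil _ s)
  | cons h0 t0 => simp

-- splitting the translated string on '.' = splitting the original at non-alphanumerics
theorem pv_splitOnP_map (cs : List Char) :
    (cs.map pvG).splitOnP (· == '.') = cs.splitOnP (fun c => !PySem.Chars.isalnum c) := by
  induction cs with
  | nil => simp
  | cons a t ih =>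
    by_cases ha : PySem.Chars.isalnum a
    · have h1 : pvG a = a := by simp [pvG, ha]
      have h2 : (a == '.') = false := by
        have : a ≠ '.' := by rintro rfl; exact absurd ha (by decide)
        simpa using this
      simp [List.splitOnP_cons, h1, h2, ha, ih]
    · have h1 : pvG a = '.' := by simp [pvG, ha]
      simp [List.splitOnP_cons, h1, ha, ih]

-- B's scan is splitOnP
theorem pv_tok_eq (cs : List Char) (acc : List (List Char)) (cur : List Char) :
    (cs.foldl pvFlushTok (acc, cur)).1 ++ [(cs.foldl pvFlushTok (acc, cur)).2]
      = acc ++ (cs.splitOnP (fun c => !PySem.Chars.isalnum c)).modifyHead (cur ++ ·) := by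
  induction cs generalizing acc cur with
  | nil => simp
  | cons a t ih =>
    by_cases ha : PySem.Chars.isalnum a
    · rw [List.foldl_cons]
      have : pvFlushTok (acc, cur) a = (acc, cur ++ [a]) := by simp [pvFlushTok, ha]
      rw [this, ih]
      have hne := List.splitOnP_ne_nil (fun c => !PySem.Chars.isalnum c) t
      cases hsp : t.splitOnP (fun c => !PySem.Chars.isalnum c) with
      | nil => exact absurd hsp hne
      | cons h0 t0 => simp [List.splitOnP_cons, ha, hsp]
    · rw [List.foldl_cons]
      have : pvFlushTok (acc, cur) a = (acc ++ [cur], []) := by simp [pvFlushTok, ha]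
      rw [this, ih]
      simp [List.splitOnP_cons, ha]
      exact congrFun List.modifyHead_id _

-- the padding/truncation tails agree
theorem pv_pad_slice (xs : List Int) :
    PySem.List.slice (xs ++ [0, 0, 0, 0]) (some 0) (some 4)
      = PySem.List.slice xs none (some 4) ++ List.replicate (4 - xs.length) 0 := by
  match xs with
  | [] => rfl
  | [a] => rfl
  | [a, b] => rfl
  | [a, b, c] => rfl
  | a :: b :: c :: d :: t =>
    simp [PySem.List.slice, PySem.List.clampIdx]

-- ===== VERDICT (by name: the statement is the Claim_ definition above) =====
theorem sclk_split_count_spec : Claim_equal_sclk_split_count := by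
  unfold Claim_equal_sclk_split_count
  intro count delim _hDom hPre
  unfold Spec_sclk_split_count
  cases delim with
  | some d =>
    simp only [sclk_split_count, sclk_split_count_alt]
    exact pv_pad_slice _
  | none =>
    simp only [sclk_split_count, sclk_split_count_alt]
    rw [pv_translate_eq]
    have hsplit : (PySem.Chars.split? (count.toList.map pvG) ['.']).getD []
        = count.toList.splitOnP (fun c => !PySem.Chars.isalnum c) := by
      rw [show PySem.Chars.split? (count.toList.map pvG) ['.']
            = some (PySem.Chars.splitOn (count.toList.map pvG) ['.']) from by
          simp [PySem.Chars.split?]]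
      rw [Option.getD_some, pv_splitOn_single, pv_splitOnP_map]
    rw [hsplit]
    have htok : ((count.toList.foldl pvFlushTok ([], [])).1
          ++ [(count.toList.foldl pvFlushTok ([], [])).2])
        = count.toList.splitOnP (fun c => !PySem.Chars.isalnum c) := by
      rw [pv_tok_eq]
      cases h : count.toList.splitOnP (fun c => !PySem.Chars.isalnum c) with
      | nil => exact absurd h (List.splitOnP_ne_nil _ _)
      | cons h0 t0 => simp
    rw [htok]
    exact pv_pad_slice _
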